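-- pv_equiv track=rewrite | github.com/xianghuzhao/pdf-bookmark | pdf_bookmark.py | _split_title_page
-- ===== SOURCE A (Python) =====
-- _CONTENT_MINIMUM_DOTS = 4
--
-- class InvalidBookmarkSyntaxError(Exception):
--     '''Invalid bookmark syntax'''
--
-- def _split_title_page(title_page):
--     start_pos = title_page.find('.'*_CONTENT_MINIMUM_DOTS)
--     if start_pos < 0:
--         raise InvalidBookmarkSyntaxError(
--             'There must be at least {} "." specified'.format(_CONTENT_MINIMUM_DOTS))
--
--     end_pos = start_pos + _CONTENT_MINIMUM_DOTS
--     for c in title_page[start_pos+_CONTENT_MINIMUM_DOTS:]: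
--         if c != '.':
--             break
--         end_pos += 1
--
--     title = title_page[:start_pos]
--     page = title_page[end_pos:]
--
--     return title.strip(), page.strip()
-- ===== SOURCE B (Python) =====
-- _CONTENT_MINIMUM_DOTS = 4
--
-- class InvalidBookmarkSyntaxError(Exception):
--     '''Invalid bookmark syntax'''
--
-- def _split_title_page(title_page):
--     # Single left-to-right pass tracking the start of the current dot run;
--     # the first run that ends with length >= 4 determines the split.
--     run_start = None
--     for i, c in enumerate(title_page):
--         if c == '.':
--             if run_start is None:
--                 run_start = i
--         elif run_start is not None:
--             if i - run_start >= _CONTENT_MINIMUM_DOTS: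
--                 return title_page[:run_start].strip(), title_page[i:].strip()
--             run_start = None
--     if run_start is not None and len(title_page) - run_start >= _CONTENT_MINIMUM_DOTS:
--         return title_page[:run_start].strip(), ''
--     raise InvalidBookmarkSyntaxError(
--         'There must be at least {} "." specified'.format(_CONTENT_MINIMUM_DOTS))
-- ===== Notes on version B (the rewrite author's own statement) =====
-- stated objective: alternative
-- what changed: Replaces the substring search find('....') followed by a second loop that extends the dot run with a single left-to-right state-machine pass that tracks the start of the current dot run and splits at the first run of length >= 4.
import Mathlib
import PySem

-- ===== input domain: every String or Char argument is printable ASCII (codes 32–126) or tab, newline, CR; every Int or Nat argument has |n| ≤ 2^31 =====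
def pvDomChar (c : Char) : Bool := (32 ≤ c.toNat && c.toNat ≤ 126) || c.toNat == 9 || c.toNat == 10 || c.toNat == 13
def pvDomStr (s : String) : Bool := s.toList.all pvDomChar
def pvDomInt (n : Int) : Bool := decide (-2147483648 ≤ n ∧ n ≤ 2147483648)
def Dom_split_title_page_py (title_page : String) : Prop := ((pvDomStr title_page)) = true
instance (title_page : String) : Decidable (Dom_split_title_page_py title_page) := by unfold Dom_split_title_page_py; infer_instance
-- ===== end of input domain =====

-- B replaces A's substring search (find('....')) plus a second run-extending loop by a single
-- left-to-right state-machine pass that tracks the start of the current dot run; alternative, same cost.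
-- A raises InvalidBookmarkSyntaxError when '....' does not occur; those inputs are outside Pre_.

-- ===== PORT A =====
-- the for-loop 'for c in title_page[start_pos+4:]: if c != '.': break; end_pos += 1'
def pvExtendRun (cs : List Char) (e : Int) : Int :=
  match cs with
  | [] => e
  | c :: rest => if c ≠ '.' then e else pvExtendRun rest (e + 1)

def split_title_page_py (title_page : String) : String × String :=
  let s := title_page.toList
  let start_pos := PySem.Chars.find s ['.', '.', '.', '.']
  if start_pos < 0 then ("", "")   -- unreachable under Pre_: Python raises InvalidBookmarkSyntaxError here
  else
    let end_pos := pvExtendRun (PySem.Chars.slice s (some (start_pos + 4)) none) (start_pos + 4)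
    let title := PySem.Chars.slice s none (some start_pos)
    let page := PySem.Chars.slice s (some end_pos) none
    (String.ofList (PySem.Chars.strip title), String.ofList (PySem.Chars.strip page))

-- ===== PORT B =====
-- Source B's single pass: i is the enumerate index, run_start the start of the current dot run (None ↔ none);
-- the result is the pair of split positions (run_start, i), none where Python raises.
-- The [] case merges Source B's after-loop check (there page is title_page[len:] = '', i.e. s.drop i = []).
def pvScan (cs : List Char) (i : Nat) (run_start : Option Nat) : Option (Nat × Nat) :=
  match cs with
  | [] =>
    match run_start with
    | some r => if 4 ≤ i - r then some (r, i) else none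
    | none => none
  | c :: t =>
    if c = '.' then
      match run_start with
      | none => pvScan t (i + 1) (some i)
      | some r => pvScan t (i + 1) (some r)
    else
      match run_start with
      | some r => if 4 ≤ i - r then some (r, i) else pvScan t (i + 1) none
      | none => pvScan t (i + 1) none

def split_title_page_py_alt (title_page : String) : String × String :=
  let s := title_page.toList
  match pvScan s 0 none with
  | some (r, e) =>
      (String.ofList (PySem.Chars.strip (s.take r)), String.ofList (PySem.Chars.strip (s.drop e)))
  | none => ("", "")   -- Python raises InvalidBookmarkSyntaxError here

-- ===== PRECONDITION & SPEC =====
-- Pre_ excludes exactly the inputs with no run of 4 dots, where Python A raises InvalidBookmarkSyntaxError.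
def Pre_split_title_page_py (title_page : String) : Prop :=
  PySem.Str.isIn "...." title_page = true
instance (title_page : String) : Decidable (Pre_split_title_page_py title_page) := by unfold Pre_split_title_page_py; infer_instance
def pvWitness_split_title_page_py : String := "Intro ......  7 "

def Spec_split_title_page_py (title_page : String) (out : String × String) : Prop := out = split_title_page_py_alt title_page
instance (title_page : String) (out : String × String) : Decidable (Spec_split_title_page_py title_page out) := by unfold Spec_split_title_page_py; infer_instance

-- ===== CLAIM (what is proved, stated in full; the proofs are below) =====
def Claim_equal_split_title_page_py : Prop := ∀ (title_page : String), Dom_split_title_page_py title_page → Pre_split_title_page_py title_page → Spec_split_title_page_py title_page (split_title_page_py title_page)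

-- ===== LEMMAS AND PROOFS =====

-- A's extension loop counts the leading dots of its input on top of e
lemma pvExtendRun_eq (cs : List Char) (e : Int) :
    pvExtendRun cs e = e + (cs.takeWhile (· == '.')).length := by
  induction cs generalizing e with
  | nil => simp [pvExtendRun]
  | cons c rest ih =>
    by_cases h : c = '.'
    · simp [pvExtendRun, h, ih]; ring
    · simp [pvExtendRun, h]

-- find.go at offset k is find shifted by k (with -1 preserved)
lemma pvFindGo_shift (s sub : List Char) (k : Nat) :
    PySem.Chars.find.go sub s k =
      if PySem.Chars.find s sub = -1 then -1 else PySem.Chars.find s sub + k := by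
  induction s generalizing k with
  | nil =>
    by_cases h : sub.isEmpty <;>
      simp [PySem.Chars.find.go, PySem.Chars.find, h]
  | cons c t ih =>
    by_cases h : sub.isPrefixOf (c :: t)
    · simp [PySem.Chars.find.go, PySem.Chars.find, h]
    · have hgo : ∀ j : Nat, PySem.Chars.find.go sub (c :: t) j = PySem.Chars.find.go sub t (j + 1) := by
        intro j; simp [PySem.Chars.find.go, h]
      have hfind : PySem.Chars.find (c :: t) sub = PySem.Chars.find.go sub t 1 := by
        simp [PySem.Chars.find, hgo 0]
      have hge := PySem.Chars.neg_one_le_find t sub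
      rw [hgo k, ih (k + 1), hfind, ih 1]
      by_cases h2 : PySem.Chars.find t sub = -1 <;> simp [h2] <;> split_ifs <;> omega

lemma pvFind_cons_not_prefix (c : Char) (t sub : List Char) (h : ¬ sub <+: (c :: t)) :
    PySem.Chars.find (c :: t) sub =
      if PySem.Chars.find t sub = -1 then -1 else PySem.Chars.find t sub + 1 := by
  have h' : sub.isPrefixOf (c :: t) = false := by
    rw [Bool.eq_false_iff]; intro hb; exact h (List.isPrefixOf_iff_prefix.mp hb)
  have : PySem.Chars.find (c :: t) sub = PySem.Chars.find.go sub t 1 := by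
    simp [PySem.Chars.find, PySem.Chars.find.go, h']
  rw [this, pvFindGo_shift]
  norm_num

lemma pvFind_prefix (s sub : List Char) (h : sub <+: s) : PySem.Chars.find s sub = 0 := by
  cases s with
  | nil =>
    have : sub = [] := List.prefix_nil.mp h
    subst this; rfl
  | cons c t =>
    simp [PySem.Chars.find, PySem.Chars.find.go, List.isPrefixOf_iff_prefix.mpr h]

lemma pvTakeWhile_drop (p : Char → Bool) (cs : List Char) (k : Nat)
    (h : k ≤ (cs.takeWhile p).length) :
    ((cs.drop k).takeWhile p).length = (cs.takeWhile p).length - k := by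
  induction k generalizing cs with
  | zero => simp
  | succ k ih =>
    cases cs with
    | nil => simp at h
    | cons c t =>
      by_cases hp : p c
      · have h' : k ≤ (t.takeWhile p).length := by
          simp [List.takeWhile_cons, hp] at h; omega
        have := ih t h'
        simp [List.takeWhile_cons, hp, List.drop_succ_cons, this]
      · simp [List.takeWhile_cons, hp] at h

lemma pvTakeWhile_replicate (cs : List Char) :
    cs.takeWhile (· == '.') = List.replicate (cs.takeWhile (· == '.')).length '.' := by
  rw [List.eq_replicate_iff]
  exact ⟨rfl, fun b hb => by simpa using List.mem_takeWhile_imp hb⟩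

-- find on a short dot run followed by a non-dot skips past the run
lemma pvFind_run_lt (m : Nat) (hm : m < 4) (x : Char) (hx : x ≠ '.') (t' : List Char) :
    PySem.Chars.find (List.replicate m '.' ++ x :: t') ['.', '.', '.', '.'] =
      if PySem.Chars.find t' ['.', '.', '.', '.'] = -1 then -1
      else PySem.Chars.find t' ['.', '.', '.', '.'] + (m + 1) := by
  induction m with
  | zero =>
    have hnp : ¬ (['.', '.', '.', '.'] : List Char) <+: (x :: t') := by
      intro hpre
      exact hx (List.cons_prefix_cons.mp hpre).1.symm
    rw [show List.replicate 0 '.' ++ x :: t' = x :: t' by simp]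
    rw [pvFind_cons_not_prefix _ _ _ hnp]
    norm_num
  | succ m ih =>
    have hm' : m < 4 := by omega
    have hrepr : List.replicate (m + 1) '.' ++ x :: t' =
        '.' :: (List.replicate m '.' ++ x :: t') := by
      simp [List.replicate_succ]
    have hnp : ¬ (['.', '.', '.', '.'] : List Char) <+:
        ('.' :: (List.replicate m '.' ++ x :: t')) := by
      intro hpre
      have hm2 : m ≤ 2 := by omega
      interval_cases m <;>
        simp [List.replicate, List.cons_prefix_cons] at hpre <;>
        first
          | exact hx hpre.symm
          | exact hx hpre.1.symm
          | exact hx hpre.2.1.symm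
          | exact hx hpre.2.2.1.symm
    rw [hrepr, pvFind_cons_not_prefix _ _ _ hnp, ih hm']
    have hge := PySem.Chars.neg_one_le_find t' ['.', '.', '.', '.']
    by_cases h2 : PySem.Chars.find t' ['.', '.', '.', '.'] = -1 <;> simp [h2] <;>
      split_ifs <;> push_cast <;> omega

-- B's scanner in the some-state: finish the current run, then either split or resume in the none-state
lemma pvScan_some (cs : List Char) (i r : Nat) (hr : r ≤ i) :
    pvScan cs i (some r) =
      if 4 ≤ i - r + (cs.takeWhile (· == '.')).length then
        some (r, i + (cs.takeWhile (· == '.')).length)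
      else
        match cs.dropWhile (· == '.') with
        | [] => none
        | _ :: t => pvScan t (i + (cs.takeWhile (· == '.')).length + 1) none := by
  induction cs generalizing i with
  | nil => simp [pvScan]
  | cons c t ih =>
    by_cases hc : c = '.'
    · subst hc
      have h1 : pvScan ('.' :: t) i (some r) = pvScan t (i + 1) (some r) := by
        simp [pvScan]
      rw [h1, ih (i + 1) (by omega)]
      have htw : (('.' :: t).takeWhile (· == '.')) = '.' :: t.takeWhile (· == '.') := by
        simp [List.takeWhile_cons]
      have hdw : (('.' :: t).dropWhile (· == '.')) = t.dropWhile (· == '.') := by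
        simp [List.dropWhile_cons]
      rw [htw, hdw]
      have e1 : i + 1 - r + (t.takeWhile (· == '.')).length
          = i - r + ('.' :: t.takeWhile (· == '.')).length := by simp; omega
      have e2 : i + 1 + (t.takeWhile (· == '.')).length
          = i + ('.' :: t.takeWhile (· == '.')).length := by simp; omega
      have e3 : i + 1 + (t.takeWhile (· == '.')).length + 1
          = i + ('.' :: t.takeWhile (· == '.')).length + 1 := by simp; omega
      rw [e1, e2]
    · have h1 : pvScan (c :: t) i (some r) =
          if 4 ≤ i - r then some (r, i) else pvScan t (i + 1) none := by
        simp [pvScan, hc]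
      have htw : ((c :: t).takeWhile (· == '.')) = [] := by
        simp [List.takeWhile_cons, hc]
      have hdw : ((c :: t).dropWhile (· == '.')) = c :: t := by
        simp [List.dropWhile_cons, hc]
      rw [h1, htw, hdw]
      simp

-- B's scanner in the none-state computes exactly A's (start, end) positions, shifted by i
lemma pvScan_none (n : Nat) : ∀ (cs : List Char), cs.length ≤ n → ∀ (i : Nat),
    pvScan cs i none =
      if PySem.Chars.find cs ['.', '.', '.', '.'] = -1 then none
      else some (i + (PySem.Chars.find cs ['.', '.', '.', '.']).toNat,
                 i + (PySem.Chars.find cs ['.', '.', '.', '.']).toNat + 4 +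
                   ((cs.drop ((PySem.Chars.find cs ['.', '.', '.', '.']).toNat + 4)).takeWhile
                     (· == '.')).length) := by
  induction n with
  | zero =>
    intro cs hcs i
    have : cs = [] := List.length_eq_zero_iff.mp (Nat.le_zero.mp hcs)
    subst this
    simp [pvScan, show PySem.Chars.find ([] : List Char) ['.', '.', '.', '.'] = -1 from by decide]
  | succ n ih =>
    intro cs hcs i
    cases cs with
    | nil =>
      simp [pvScan, show PySem.Chars.find ([] : List Char) ['.', '.', '.', '.'] = -1 from by decide]
    | cons c t =>
      by_cases hc : c = '.'
      · subst hc
        have h1 : pvScan ('.' :: t) i none = pvScan t (i + 1) (some i) := by simp [pvScan]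
        rw [h1, pvScan_some t (i + 1) i (by omega)]
        set d := (t.takeWhile (· == '.')).length with hd
        by_cases hd3 : 3 ≤ d
        · -- the leading run has length 1 + d ≥ 4: find = 0
          have hpre : (['.', '.', '.', '.'] : List Char) <+: ('.' :: t) := by
            rw [List.prefix_iff_eq_take]
            have ht3 : t.take 3 = List.replicate 3 '.' := by
              conv_lhs => rw [← List.takeWhile_append_dropWhile (p := (· == '.')) (l := t)]
              rw [List.take_append_of_le_length (by rw [← hd]; omega),
                  pvTakeWhile_replicate t, ← hd, List.take_replicate]
              congr 1
              omega
            simp [ht3, List.replicate]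
          have hfind : PySem.Chars.find ('.' :: t) ['.', '.', '.', '.'] = 0 :=
            pvFind_prefix _ _ hpre
          rw [hfind]
          have hcond : 4 ≤ i + 1 - i + d := by omega
          rw [if_pos hcond, if_neg (by norm_num)]
          have hdrop : ('.' :: t).drop (((0 : Int)).toNat + 4) = t.drop 3 := by
            simp [List.drop_succ_cons]
          rw [hdrop]
          have hlen : ((t.drop 3).takeWhile (· == '.')).length = d - 3 :=
            pvTakeWhile_drop _ t 3 (by omega)
          rw [hlen]
          simp only [Option.some.injEq, Prod.mk.injEq]
          omega
        · -- the leading run has length 1 + d ≤ 3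
          have hcond : ¬ 4 ≤ i + 1 - i + d := by omega
          rw [if_neg hcond]
          rcases ht' : t.dropWhile (· == '.') with _ | ⟨x, t'⟩
          · -- the whole string is a short dot run: no match
            have ht : t = List.replicate d '.' := by
              conv_lhs => rw [← List.takeWhile_append_dropWhile (p := (· == '.')) (l := t)]
              rw [ht', pvTakeWhile_replicate t, ← hd, List.append_nil]
            have hfind : PySem.Chars.find ('.' :: t) ['.', '.', '.', '.'] = -1 := by
              rw [PySem.Chars.find_eq_neg_one_iff]
              intro hinf
              have := hinf.length_le
              simp [ht] at this
              omega
            rw [hfind]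
            simp
          · -- run of length 1 + d < 4, then a non-dot x, then t'
            have ht : t = List.replicate d '.' ++ x :: t' := by
              conv_lhs => rw [← List.takeWhile_append_dropWhile (p := (· == '.')) (l := t)]
              rw [ht', pvTakeWhile_replicate t, ← hd]
            have hxne : x ≠ '.' := by
              intro hxe
              subst hxe
              have hall : ∀ a ∈ List.replicate d '.', ((a == '.') = true) := by
                intro a ha
                simp [List.eq_of_mem_replicate ha]
              have htw2 : t.takeWhile (· == '.')
                  = List.replicate d '.' ++ ('.' :: t').takeWhile (· == '.') := by
                conv_lhs => rw [ht]
                exact List.takeWhile_append_of_pos hall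
              have hlen2 := congrArg List.length htw2
              rw [← hd] at hlen2
              simp [List.takeWhile_cons] at hlen2
            have hlt' : t'.length ≤ n := by
              have : t.length ≤ n := by simpa using hcs
              rw [ht] at this
              simp at this
              omega
            rw [show (match x :: t' with
                  | [] => (none : Option (Nat × Nat))
                  | _ :: tt => pvScan tt (i + 1 + d + 1) none)
                = pvScan t' (i + 1 + d + 1) none from rfl]
            rw [ih t' hlt' (i + 1 + d + 1)]
            have hrepr : ('.' :: t) = List.replicate (d + 1) '.' ++ x :: t' := by
              rw [ht]; simp [List.replicate_succ]
            have hfind : PySem.Chars.find ('.' :: t) ['.', '.', '.', '.'] =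
                if PySem.Chars.find t' ['.', '.', '.', '.'] = -1 then -1
                else PySem.Chars.find t' ['.', '.', '.', '.'] + (d + 1 + 1) := by
              rw [hrepr]
              have := pvFind_run_lt (d + 1) (by omega) x hxne t'
              rw [this]
              by_cases h2 : PySem.Chars.find t' ['.', '.', '.', '.'] = -1 <;> simp [h2] <;> push_cast <;> ring
            rw [hfind]
            by_cases h2 : PySem.Chars.find t' ['.', '.', '.', '.'] = -1
            · simp [h2]
            · have hge := PySem.Chars.neg_one_le_find t' ['.', '.', '.', '.']
              have hge0 : 0 ≤ PySem.Chars.find t' ['.', '.', '.', '.'] := by omega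
              set p' := PySem.Chars.find t' ['.', '.', '.', '.'] with hp'
              have hne2 : ¬ (p' + (↑d + 1 + 1) = -1) := by omega
              simp only [if_neg h2]
              rw [if_neg hne2]
              have htn : (p' + (↑d + 1 + 1)).toNat = p'.toNat + (d + 2) := by omega
              have hdropcs : ∀ k : Nat, ('.' :: t).drop (k + (d + 2)) = t'.drop k := by
                intro k
                have hsplit : ('.' :: t) = (List.replicate (d + 1) '.' ++ [x]) ++ t' := by
                  rw [hrepr]; simp
                rw [hsplit]
                rw [show k + (d + 2) = (List.replicate (d + 1) '.' ++ [x]).length + k by simp; omega]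
                rw [← List.drop_drop, List.drop_left]
              have hdrop2 : ('.' :: t).drop ((p' + (↑d + 1 + 1)).toNat + 4)
                  = t'.drop (p'.toNat + 4) := by
                rw [htn, show p'.toNat + (d + 2) + 4 = (p'.toNat + 4) + (d + 2) by omega,
                    hdropcs]
              rw [hdrop2, htn]
              simp only [Option.some.injEq, Prod.mk.injEq]
              omega
      · -- head is not a dot: step the none-state
        have h1 : pvScan (c :: t) i none = pvScan t (i + 1) none := by simp [pvScan, hc]
        rw [h1, ih t (by simpa using hcs) (i + 1)]
        have hnp : ¬ (['.', '.', '.', '.'] : List Char) <+: (c :: t) := by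
          intro hpre
          exact hc (List.cons_prefix_cons.mp hpre).1.symm
        rw [pvFind_cons_not_prefix _ _ _ hnp]
        by_cases h2 : PySem.Chars.find t ['.', '.', '.', '.'] = -1
        · simp [h2]
        · have hge := PySem.Chars.neg_one_le_find t ['.', '.', '.', '.']
          have hge0 : 0 ≤ PySem.Chars.find t ['.', '.', '.', '.'] := by omega
          set p := PySem.Chars.find t ['.', '.', '.', '.'] with hp
          have hne2 : ¬ (p + 1 = -1) := by omega
          simp only [if_neg h2]
          rw [if_neg hne2]
          have htn : (p + 1).toNat = p.toNat + 1 := by omega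
          have hdrop : (c :: t).drop ((p + 1).toNat + 4) = t.drop (p.toNat + 4) := by
            rw [htn, show p.toNat + 1 + 4 = (p.toNat + 4) + 1 by omega]
            simp [List.drop_succ_cons]
          rw [hdrop, htn]
          simp only [Option.some.injEq, Prod.mk.injEq]
          omega

-- ===== VERDICT (by name: the statement is the Claim_ definition above) =====
theorem split_title_page_py_spec : Claim_equal_split_title_page_py := by
  intro tp _hd hpre
  have hin : PySem.Chars.isIn "....".toList tp.toList = true := by
    simpa [PySem.Str.isIn] using hpre
  have hfind : 0 ≤ PySem.Chars.find tp.toList ['.', '.', '.', '.'] := by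
    have h := (PySem.Chars.find_nonneg_iff tp.toList "....".toList).mpr
      ((PySem.Chars.isIn_iff_infix _ _).mp hin)
    simpa using h
  unfold Spec_split_title_page_py split_title_page_py split_title_page_py_alt
  simp only
  rw [pvScan_none tp.toList.length tp.toList le_rfl 0]
  generalize hP : PySem.Chars.find tp.toList ['.', '.', '.', '.'] = p at hfind ⊢
  rw [if_neg (not_lt.mpr hfind), if_neg (by omega : ¬ p = -1)]
  have h4 : (0 : Int) ≤ p + 4 := by omega
  simp only [PySem.Chars.slice_eq_listSlice]
  rw [PySem.List.slice_from tp.toList h4, PySem.List.slice_to tp.toList hfind, pvExtendRun_eq]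
  have hposnat : (p + 4).toNat = p.toNat + 4 := by omega
  rw [hposnat]
  set w := ((tp.toList.drop (p.toNat + 4)).takeWhile (· == '.')).length with hw
  have hend : (0 : Int) ≤ p + 4 + (w : Int) := by omega
  rw [PySem.List.slice_from tp.toList hend]
  have hendnat : (p + 4 + (w : Int)).toNat = 0 + p.toNat + 4 + w := by omega
  rw [hendnat]
  simp
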